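-- pv_equiv track=rewrite | github.com/Qylwok/PR-3001A | PR-3001A/Rendu final/Version finale/fonctions.py | CoordDiagDG
-- ===== SOURCE A (Python) =====
-- def CoordDiagGD(P, N, A):
-- 	coord = []
-- 	k = N - A
-- 	for i in range(N):
-- 		for j in range(N):
-- 			if abs(i-j) <= k:
-- 				coord.append([i, j])
-- 	return coord
--
-- def CoordDiagDG(P, N, A):
-- 	coordDG = CoordDiagGD(P, N, A)
-- 	coord = []
-- 	k = int(N/2)
-- 	for elt in coordDG:
-- 		x = elt[0]
-- 		y = elt[1]
-- 		yp = (N-1-y)%N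
-- 		coord.append([x, yp])
-- 	return coord
-- ===== SOURCE B (Python) =====
-- def CoordDiagDG(P, N, A):
--     # One pass over the band only: for each row i, visit exactly the columns
--     # j with |i-j| <= k, and mirror the column directly (N-1-j is already in
--     # [0, N-1], so no modulo is needed).
--     k = N - A
--     out = []
--     for i in range(N):
--         for j in range(max(0, i - k), min(N, i + k + 1)):
--             out.append([i, N - 1 - j])
--     return out
-- ===== Notes on version B (the rewrite author's own statement) =====
-- stated objective: faster
-- what changed: B is a single pass that, for each row i, iterates only the band columns j in [max(0,i-k), min(N,i+k+1)) and emits [i, N-1-j] directly, instead of A's two passes (scan all N columns per row with an abs test, then a second mapping pass taking (N-1-y)%N); intended as faster (O(output size) vs O(N^2)); a timing run measured B 330x at the largest size both finished, but could not confirm it overall since on wide-band inputs the output itself is Theta(N^2) and both time out.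
import Mathlib
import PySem

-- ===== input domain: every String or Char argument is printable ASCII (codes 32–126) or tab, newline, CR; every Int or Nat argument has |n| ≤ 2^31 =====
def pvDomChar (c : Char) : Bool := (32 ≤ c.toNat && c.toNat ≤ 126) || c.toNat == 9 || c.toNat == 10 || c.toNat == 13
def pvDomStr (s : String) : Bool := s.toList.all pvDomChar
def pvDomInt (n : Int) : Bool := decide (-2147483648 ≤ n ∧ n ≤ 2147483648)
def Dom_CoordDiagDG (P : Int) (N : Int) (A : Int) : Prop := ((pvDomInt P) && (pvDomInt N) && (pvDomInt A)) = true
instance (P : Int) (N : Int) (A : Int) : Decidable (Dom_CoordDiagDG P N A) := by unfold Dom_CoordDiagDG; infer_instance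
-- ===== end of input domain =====

-- B emits the band in one pass per row (columns [i-k, i+k] only, mirrored directly); intended as faster
-- (O(output size) vs O(N^2)); measured 330x at the largest size both finished, unconfirmed on wide-band inputs whose output is itself Theta(N^2).

-- ===== PORT A =====
def CoordDiagGD (P : Int) (N : Int) (A : Int) : List (List Int) :=
  let k := N - A
  (PySem.List.pyRange 0 N 1).foldl (fun coord i =>
    (PySem.List.pyRange 0 N 1).foldl (fun coord j =>
      if |i - j| ≤ k then coord ++ [[i, j]] else coord) coord) []

def CoordDiagDG (P : Int) (N : Int) (A : Int) : List (List Int) :=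
  let coordDG := CoordDiagGD P N A
  let _k := PySem.Int.truncdiv N 2   -- k = int(N/2), unused by the rest of A's body
  coordDG.foldl (fun coord elt =>
    -- elt[0] / elt[1]: exact, every element of coordDG is a two-element list [i, j]
    let x := PySem.List.pyGetD elt 0 0
    let y := PySem.List.pyGetD elt 1 0
    let yp := PySem.Int.mod (N - 1 - y) N
    coord ++ [[x, yp]]) []

-- ===== PORT B =====
def CoordDiagDG_alt (P : Int) (N : Int) (A : Int) : List (List Int) :=
  let k := N - A
  (PySem.List.pyRange 0 N 1).foldl (fun out i =>
    (PySem.List.pyRange (max 0 (i - k)) (min N (i + k + 1)) 1).foldl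
      (fun out j => out ++ [[i, N - 1 - j]]) out) []

-- ===== PRECONDITION & SPEC =====
def Spec_CoordDiagDG (P : Int) (N : Int) (A : Int) (out : List (List Int)) : Prop := out = CoordDiagDG_alt P N A
instance (P : Int) (N : Int) (A : Int) (out : List (List Int)) : Decidable (Spec_CoordDiagDG P N A out) := by unfold Spec_CoordDiagDG; infer_instance

-- ===== CLAIM (what is proved, stated in full; the proofs are below) =====
def Claim_equal_CoordDiagDG : Prop := ∀ (P : Int) (N : Int) (A : Int), Dom_CoordDiagDG P N A → Spec_CoordDiagDG P N A (CoordDiagDG P N A)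

-- ===== LEMMAS AND PROOFS =====

-- Filtering an integer range by a half-open interval keeps a contiguous sub-range.
theorem filter_pyRange_band_aux (lo hi b : Int) : ∀ (n : Nat) (a : Int), (b - a).toNat = n →
    (PySem.List.pyRange a b 1).filter (fun j => decide (lo ≤ j ∧ j < hi)) =
      PySem.List.pyRange (max a lo) (min b hi) 1 := by
  intro n
  induction n with
  | zero =>
    intro a h
    rw [PySem.List.pyRange_one_eq_nil (by omega), PySem.List.pyRange_one_eq_nil (by omega)]
    rfl
  | succ n ih =>
    intro a h
    rw [PySem.List.pyRange_one_cons (by omega), List.filter_cons, ih (a + 1) (by omega)]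
    by_cases h1 : lo ≤ a
    · by_cases h2 : a < hi
      · rw [if_pos (by simp [h1, h2])]
        have e1 : max a lo = a := by omega
        have e2 : max (a + 1) lo = a + 1 := by omega
        rw [e1, e2, PySem.List.pyRange_one_cons (by omega : a < min b hi)]
      · rw [if_neg (by simp [h2])]
        rw [PySem.List.pyRange_one_eq_nil (by omega), PySem.List.pyRange_one_eq_nil (by omega)]
    · rw [if_neg (by simp [h1])]
      have e : max a lo = max (a + 1) lo := by omega
      rw [e]

theorem filter_pyRange_band (lo hi : Int) : ∀ (a b : Int),
    (PySem.List.pyRange a b 1).filter (fun j => decide (lo ≤ j ∧ j < hi)) =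
      PySem.List.pyRange (max a lo) (min b hi) 1 :=
  fun a b => filter_pyRange_band_aux lo hi b (b - a).toNat a rfl

theorem mod_small (y N : Int) (h0 : 0 ≤ y) (h1 : y < N) : PySem.Int.mod y N = y := by
  rw [PySem.Int.mod_eq_emod_of_pos (by omega), Int.emod_eq_of_lt h0 h1]

-- ===== VERDICT (by name: the statement is the Claim_ definition above) =====
theorem CoordDiagDG_spec : Claim_equal_CoordDiagDG := by
  intro P N A _
  unfold Spec_CoordDiagDG CoordDiagDG CoordDiagGD CoordDiagDG_alt
  simp only [PySem.List.foldl_append_ite, PySem.List.foldl_append_singleton_eq_map,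
    PySem.List.foldl_append_eq_flatMap, List.nil_append, List.map_flatMap, List.map_map]
  apply List.flatMap_congr
  intro i hi
  rw [PySem.List.mem_pyRange_one] at hi
  rw [List.filter_congr (q := fun j => decide (i - (N - A) ≤ j ∧ j < i + (N - A) + 1))
        (by intro j _; simp only [decide_eq_decide, abs_le]; omega),
      filter_pyRange_band]
  apply List.map_congr_left
  intro j hj
  rw [PySem.List.mem_pyRange_one] at hj
  simp only [Function.comp, PySem.List.pyGetD]
  norm_num
  exact mod_small _ _ (by omega) (by omega)
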